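-- pv_equiv track=rewrite | github.com/AlexRubino/CS-555-Final-Project | tests/US10_TestMarriageAfterFourteen.py | generate_fam_2
-- ===== SOURCE A (Python) =====
-- def generate_fam_2(husband, wife, marriage, id=1):
--     h_birth, h_death = husband
--     w_birth, w_death = wife
--     marr_date, div_date = marriage
--     ret =  [
--         f'0 I{id}_1 INDI',
--         '1 BIRT' if h_birth is not None else '',
--         f'2 DATE {h_birth}' if h_birth is not None else '',
--         '1 DEAT' if h_death is not None else '',
--         f'2 DATE {h_death}' if h_death is not None else '',
--         f'1 FAMS F{id}',
--         f'0 I{id}_2 INDI',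
--         '1 BIRT' if w_birth is not None else '',
--         f'2 DATE {w_birth}' if w_birth is not None else '',
--         '1 DEAT' if w_death is not None else '',
--         f'2 DATE {w_death}' if w_death is not None else '',
--         f'1 FAMS F{id}',
--         f'0 F{id} FAM',
--         f'1 HUSB I{id}_1',
--         f'1 WIFE I{id}_2',
--         '1 MARR' if marr_date is not None else '',
--         f'2 DATE {marr_date}' if marr_date is not None else '',
--         '1 DIV' if div_date is not None else '',
--         f'2 DATE {div_date}' if div_date is not None else ''
--     ]
--     # This removes all the empty lines
--     return [i for i in ret if i]
-- ===== SOURCE B (Python) =====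
-- def generate_fam_2(husband, wife, marriage, id=1):
--     def indi(n, pair):
--         birth, death = pair
--         lines = [f'0 I{id}_{n} INDI']
--         if birth is not None:
--             lines += ['1 BIRT', f'2 DATE {birth}']
--         if death is not None:
--             lines += ['1 DEAT', f'2 DATE {death}']
--         lines.append(f'1 FAMS F{id}')
--         return lines
--     marr_date, div_date = marriage
--     fam = [f'0 F{id} FAM', f'1 HUSB I{id}_1', f'1 WIFE I{id}_2']
--     if marr_date is not None:
--         fam += ['1 MARR', f'2 DATE {marr_date}']
--     if div_date is not None:
--         fam += ['1 DIV', f'2 DATE {div_date}']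
--     return indi(1, husband) + indi(2, wife) + fam
-- ===== Notes on version B (the rewrite author's own statement) =====
-- stated objective: simpler
-- what changed: B builds the blocks with a shared per-person helper and conditional appends instead of emitting '' placeholders for absent dates and filtering them out of one big literal list.
import Mathlib
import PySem

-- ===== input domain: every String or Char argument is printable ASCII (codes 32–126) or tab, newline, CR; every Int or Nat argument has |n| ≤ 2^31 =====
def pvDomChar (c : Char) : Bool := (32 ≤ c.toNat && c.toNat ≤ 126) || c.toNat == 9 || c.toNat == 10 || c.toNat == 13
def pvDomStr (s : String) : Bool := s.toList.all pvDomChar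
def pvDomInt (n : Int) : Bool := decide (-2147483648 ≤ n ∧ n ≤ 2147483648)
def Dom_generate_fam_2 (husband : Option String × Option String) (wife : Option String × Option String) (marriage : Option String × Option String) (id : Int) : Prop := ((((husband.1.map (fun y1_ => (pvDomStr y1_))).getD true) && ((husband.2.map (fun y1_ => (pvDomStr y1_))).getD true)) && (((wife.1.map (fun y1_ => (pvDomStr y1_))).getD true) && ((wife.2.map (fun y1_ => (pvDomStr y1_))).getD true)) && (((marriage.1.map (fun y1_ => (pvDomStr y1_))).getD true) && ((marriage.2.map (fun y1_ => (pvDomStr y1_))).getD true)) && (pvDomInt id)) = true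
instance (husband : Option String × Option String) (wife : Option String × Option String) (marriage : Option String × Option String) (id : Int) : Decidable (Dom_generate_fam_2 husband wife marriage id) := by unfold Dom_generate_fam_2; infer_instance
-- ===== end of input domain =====

-- B builds the three GEDCOM blocks with a shared per-person helper and conditional appends,
-- instead of A's single literal list with '' placeholders filtered out afterwards (objective: simpler).

-- ===== PORT A =====
-- Literal port of A: one 19-element list with '' placeholders for absent dates,
-- then the comprehension `[i for i in ret if i]` as a filter on non-emptiness.
def generate_fam_2 (husband : Option String × Option String) (wife : Option String × Option String) (marriage : Option String × Option String) (id : Int) : List String :=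
  let h_birth := husband.1; let h_death := husband.2
  let w_birth := wife.1; let w_death := wife.2
  let marr_date := marriage.1; let div_date := marriage.2
  let ret : List String := [
    "0 I" ++ PySem.Int.toStr id ++ "_1 INDI",
    if h_birth.isSome then "1 BIRT" else "",
    match h_birth with | some b => "2 DATE " ++ b | none => "",
    if h_death.isSome then "1 DEAT" else "",
    match h_death with | some d => "2 DATE " ++ d | none => "",
    "1 FAMS F" ++ PySem.Int.toStr id,
    "0 I" ++ PySem.Int.toStr id ++ "_2 INDI",
    if w_birth.isSome then "1 BIRT" else "",
    match w_birth with | some b => "2 DATE " ++ b | none => "",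
    if w_death.isSome then "1 DEAT" else "",
    match w_death with | some d => "2 DATE " ++ d | none => "",
    "1 FAMS F" ++ PySem.Int.toStr id,
    "0 F" ++ PySem.Int.toStr id ++ " FAM",
    "1 HUSB I" ++ PySem.Int.toStr id ++ "_1",
    "1 WIFE I" ++ PySem.Int.toStr id ++ "_2",
    if marr_date.isSome then "1 MARR" else "",
    match marr_date with | some m => "2 DATE " ++ m | none => "",
    if div_date.isSome then "1 DIV" else "",
    match div_date with | some d => "2 DATE " ++ d | none => ""]
  ret.filter (fun i => i != "")

-- ===== PORT B =====
-- B's helper `indi`: the INDI block for one person (header, optional BIRT/DEAT lines, FAMS footer).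
def pvIndi (id : Int) (n : Int) (pair : Option String × Option String) : List String :=
  let lines : List String := ["0 I" ++ PySem.Int.toStr id ++ "_" ++ PySem.Int.toStr n ++ " INDI"]
  let lines := match pair.1 with
    | some birth => lines ++ ["1 BIRT", "2 DATE " ++ birth]
    | none => lines
  let lines := match pair.2 with
    | some death => lines ++ ["1 DEAT", "2 DATE " ++ death]
    | none => lines
  lines ++ ["1 FAMS F" ++ PySem.Int.toStr id]

def generate_fam_2_alt (husband : Option String × Option String) (wife : Option String × Option String) (marriage : Option String × Option String) (id : Int) : List String :=
  let fam : List String := ["0 F" ++ PySem.Int.toStr id ++ " FAM",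
    "1 HUSB I" ++ PySem.Int.toStr id ++ "_1", "1 WIFE I" ++ PySem.Int.toStr id ++ "_2"]
  let fam := match marriage.1 with
    | some m => fam ++ ["1 MARR", "2 DATE " ++ m]
    | none => fam
  let fam := match marriage.2 with
    | some d => fam ++ ["1 DIV", "2 DATE " ++ d]
    | none => fam
  pvIndi id 1 husband ++ pvIndi id 2 wife ++ fam

-- ===== PRECONDITION & SPEC =====
def Spec_generate_fam_2 (husband : Option String × Option String) (wife : Option String × Option String) (marriage : Option String × Option String) (id : Int) (out : List String) : Prop := out = generate_fam_2_alt husband wife marriage id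
instance (husband : Option String × Option String) (wife : Option String × Option String) (marriage : Option String × Option String) (id : Int) (out : List String) : Decidable (Spec_generate_fam_2 husband wife marriage id out) := by unfold Spec_generate_fam_2; infer_instance

-- ===== CLAIM (what is proved, stated in full; the proofs are below) =====
def Claim_equal_generate_fam_2 : Prop := ∀ (husband : Option String × Option String) (wife : Option String × Option String) (marriage : Option String × Option String) (id : Int), Dom_generate_fam_2 husband wife marriage id → Spec_generate_fam_2 husband wife marriage id (generate_fam_2 husband wife marriage id)

-- ===== LEMMAS AND PROOFS =====
-- Every line A's filter keeps has a nonempty literal prefix, so the `!= ""` test is `true`.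
theorem pvNe1 (x : String) : ("0 I" ++ x != "") = true := by simp [String.ext_iff]
theorem pvNe2 (x : String) : ("1 FAMS F" ++ x != "") = true := by simp [String.ext_iff]
theorem pvNe3 (x : String) : ("0 F" ++ x != "") = true := by simp [String.ext_iff]
theorem pvNe4 (x : String) : ("1 HUSB I" ++ x != "") = true := by simp [String.ext_iff]
theorem pvNe5 (x : String) : ("1 WIFE I" ++ x != "") = true := by simp [String.ext_iff]
theorem pvNe6 (x : String) : ("2 DATE " ++ x != "") = true := by simp [String.ext_iff]

-- B formats the person number n; at n = 1, 2 this matches A's literal suffixes.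
theorem pvLit : "_1 INDI" = "_" ++ (PySem.Int.toStr 1 ++ " INDI") ∧ "_2 INDI" = "_" ++ (PySem.Int.toStr 2 ++ " INDI") := by decide

-- ===== VERDICT (by name: the statement is the Claim_ definition above) =====
theorem generate_fam_2_spec : Claim_equal_generate_fam_2 := by
  intro husband wife marriage id _
  unfold Spec_generate_fam_2
  obtain ⟨hb, hd⟩ := husband; obtain ⟨wb, wd⟩ := wife; obtain ⟨m, d⟩ := marriage
  cases hb <;> cases hd <;> cases wb <;> cases wd <;> cases m <;> cases d <;>
    simp [generate_fam_2, generate_fam_2_alt, pvIndi, List.filter, pvNe1, pvNe2, pvNe3,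
      pvNe4, pvNe5, pvNe6, String.append_assoc] <;> exact pvLit
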